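-- pv_equiv track=rewrite | github.com/ravish-oo/arc-agi-oo | src/signature_builders.py | nps_boundary_masks
-- ===== SOURCE A (Python) =====
-- def nps_boundary_masks(
--     band_masks: list[list[list[int]]], axis: str
-- ) -> list[list[int]]:
--     """
--     Compute boundary mask from NPS band masks (pair-invariant).
--
--     A pixel is on a boundary if it's at the edge between two bands.
--     For row bands: boundary is where adjacent rows belong to different bands.
--     For col bands: boundary is where adjacent cols belong to different bands.
--
--     Args:
--         band_masks: List of band masks from row_band_masks or col_band_masks
--         axis: "row" or "col" indicating which axis to check
--
--     Returns:
--         Binary mask: 1 if pixel is on boundary, 0 otherwise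
--
--     Examples:
--         >>> # Two row bands: rows 0-1 (band 0), rows 2-3 (band 1)
--         >>> bands = [[[1,1],[1,1],[0,0],[0,0]], [[0,0],[0,0],[1,1],[1,1]]]
--         >>> nps_boundary_masks(bands, "row")
--         [[0, 0], [1, 1], [1, 1], [0, 0]]  # Rows 1 and 2 are on boundary
--     """
--     if not band_masks:
--         return []
--
--     h = len(band_masks[0])
--     w = len(band_masks[0][0]) if band_masks[0] else 0
--
--     if h == 0 or w == 0:
--         return []
--
--     # Create boundary mask
--     boundary = [[0] * w for _ in range(h)]
--
--     if axis == "row":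
--         # Check row boundaries (adjacent rows in different bands)
--         for r in range(h):
--             for c in range(w):
--                 # Check if row r is at boundary with row r-1 or r+1
--                 is_boundary = False
--
--                 if r > 0:
--                     # Check if (r, c) and (r-1, c) are in different bands
--                     for band_mask in band_masks:
--                         if band_mask[r][c] != band_mask[r - 1][c]:
--                             is_boundary = True
--                             break
--
--                 if r < h - 1 and not is_boundary:
--                     # Check if (r, c) and (r+1, c) are in different bands
--                     for band_mask in band_masks:
--                         if band_mask[r][c] != band_mask[r + 1][c]:
--                             is_boundary = True
--                             break
--
--                 boundary[r][c] = 1 if is_boundary else 0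
--
--     else:  # axis == "col"
--         # Check col boundaries (adjacent cols in different bands)
--         for r in range(h):
--             for c in range(w):
--                 # Check if col c is at boundary with col c-1 or c+1
--                 is_boundary = False
--
--                 if c > 0:
--                     # Check if (r, c) and (r, c-1) are in different bands
--                     for band_mask in band_masks:
--                         if band_mask[r][c] != band_mask[r][c - 1]:
--                             is_boundary = True
--                             break
--
--                 if c < w - 1 and not is_boundary:
--                     # Check if (r, c) and (r, c+1) are in different bands
--                     for band_mask in band_masks:
--                         if band_mask[r][c] != band_mask[r][c + 1]:
--                             is_boundary = True
--                             break
--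
--                 boundary[r][c] = 1 if is_boundary else 0
--
--     return boundary
-- ===== SOURCE B (Python) =====
-- def nps_boundary_masks(
--     band_masks: list[list[list[int]]], axis: str
-- ) -> list[list[int]]:
--     if not band_masks:
--         return []
--     h = len(band_masks[0])
--     w = len(band_masks[0][0]) if band_masks[0] else 0
--     if h == 0 or w == 0:
--         return []
--     # one pass: per-pixel signature across all bands
--     sig = [[tuple(bm[r][c] for bm in band_masks) for c in range(w)] for r in range(h)]
--     if axis == "row":
--         return [
--             [1 if ((r > 0 and sig[r][c] != sig[r - 1][c])
--                    or (r < h - 1 and sig[r][c] != sig[r + 1][c])) else 0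
--              for c in range(w)]
--             for r in range(h)
--         ]
--     return [
--         [1 if ((c > 0 and sig[r][c] != sig[r][c - 1])
--                or (c < w - 1 and sig[r][c] != sig[r][c + 1])) else 0
--          for c in range(w)]
--         for r in range(h)
--     ]
-- ===== Notes on version B (the rewrite author's own statement) =====
-- stated objective: simpler
-- what changed: B precomputes a per-pixel band-signature table sig[r][c] = tuple of all band values in one pass and marks a pixel as boundary by comparing its signature with its axis neighbours, replacing A's imperative fill of a preallocated matrix with per-pixel inline scans over all band masks with early break.
-- outside the precondition, e.g. on nps_boundary_masks([[[1, 1]], [[0]]], 'row'): A returns [[0, 0]], B raises IndexError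
import Mathlib
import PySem

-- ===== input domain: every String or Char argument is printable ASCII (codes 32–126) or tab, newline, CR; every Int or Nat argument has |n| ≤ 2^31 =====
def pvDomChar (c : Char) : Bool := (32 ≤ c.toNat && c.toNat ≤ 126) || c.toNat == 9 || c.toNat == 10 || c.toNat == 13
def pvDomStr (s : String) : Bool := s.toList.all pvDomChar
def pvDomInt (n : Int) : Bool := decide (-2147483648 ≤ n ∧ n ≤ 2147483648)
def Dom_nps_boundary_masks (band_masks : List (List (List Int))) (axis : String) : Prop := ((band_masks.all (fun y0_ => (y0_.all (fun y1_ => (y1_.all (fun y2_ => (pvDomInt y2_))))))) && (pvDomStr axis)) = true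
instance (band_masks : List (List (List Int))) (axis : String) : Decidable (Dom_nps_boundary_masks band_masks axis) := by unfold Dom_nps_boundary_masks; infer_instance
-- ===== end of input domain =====

-- B replaces A's per-pixel inline scans over all band masks by a precomputed per-pixel
-- signature table compared against axis neighbours (objective: simpler).

-- ===== PORT A =====
-- bm[r][c] (indices are always 0 ≤ r,c and in range inside Pre_; default never reached there)
def pvCell (bm : List (List Int)) (r c : Int) : Int :=
  PySem.List.pyGetD (PySem.List.pyGetD bm r []) c 0

-- h = len(band_masks[0]);  w = len(band_masks[0][0]) if band_masks[0] else 0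
def pvH (band_masks : List (List (List Int))) : Int := ((band_masks.headD []).length : Int)
def pvW (band_masks : List (List (List Int))) : Int :=
  if band_masks.headD [] ≠ [] then (((band_masks.headD []).headD []).length : Int) else 0

-- the inner 'for band_mask in band_masks: if …: is_boundary = True; break' loop
def pvAnyDiff (band_masks : List (List (List Int))) (r c r' c' : Int) : Bool :=
  band_masks.any (fun bm => pvCell bm r c != pvCell bm r' c')

-- the body of A's per-pixel computation, axis "row"
def pvRowVal (band_masks : List (List (List Int))) (h r c : Int) : Int :=
  let isB1 := if 0 < r then pvAnyDiff band_masks r c (r - 1) c else false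
  let isB2 := if r < h - 1 ∧ isB1 = false then pvAnyDiff band_masks r c (r + 1) c else isB1
  if isB2 then 1 else 0

-- the body of A's per-pixel computation, axis "col"
def pvColVal (band_masks : List (List (List Int))) (w r c : Int) : Int :=
  let isB1 := if 0 < c then pvAnyDiff band_masks r c r (c - 1) else false
  let isB2 := if c < w - 1 ∧ isB1 = false then pvAnyDiff band_masks r c r (c + 1) else isB1
  if isB2 then 1 else 0

def nps_boundary_masks (band_masks : List (List (List Int))) (axis : String) : List (List Int) :=
  if band_masks = [] then []
  else if pvH band_masks = 0 ∨ pvW band_masks = 0 then []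
  else
    -- boundary = [[0]*w for _ in range(h)], then boundary[r][c] = … cell by cell
    let boundary := List.replicate (pvH band_masks).toNat (List.replicate (pvW band_masks).toNat (0 : Int))
    if axis = "row" then
      (PySem.List.pyRange 0 (pvH band_masks) 1).foldl (fun bd r =>
        (PySem.List.pyRange 0 (pvW band_masks) 1).foldl (fun bd c =>
          bd.set r.toNat ((PySem.List.pyGetD bd r []).set c.toNat
            (pvRowVal band_masks (pvH band_masks) r c))) bd) boundary
    else
      (PySem.List.pyRange 0 (pvH band_masks) 1).foldl (fun bd r =>
        (PySem.List.pyRange 0 (pvW band_masks) 1).foldl (fun bd c =>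
          bd.set r.toNat ((PySem.List.pyGetD bd r []).set c.toNat
            (pvColVal band_masks (pvW band_masks) r c))) bd) boundary

-- ===== PORT B =====
-- sig[r][c] = tuple(bm[r][c] for bm in band_masks)
def pvSig (band_masks : List (List (List Int))) (h w : Int) : List (List (List Int)) :=
  (PySem.List.pyRange 0 h 1).map (fun r =>
    (PySem.List.pyRange 0 w 1).map (fun c => band_masks.map (fun bm => pvCell bm r c)))

def pvSigAt (sig : List (List (List Int))) (r c : Int) : List Int :=
  PySem.List.pyGetD (PySem.List.pyGetD sig r []) c []

def nps_boundary_masks_alt (band_masks : List (List (List Int))) (axis : String) : List (List Int) :=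
  if band_masks = [] then []
  else if pvH band_masks = 0 ∨ pvW band_masks = 0 then []
  else
    let sig := pvSig band_masks (pvH band_masks) (pvW band_masks)
    if axis = "row" then
      (PySem.List.pyRange 0 (pvH band_masks) 1).map (fun r =>
        (PySem.List.pyRange 0 (pvW band_masks) 1).map (fun c =>
          if (0 < r ∧ pvSigAt sig r c ≠ pvSigAt sig (r - 1) c) ∨
             (r < pvH band_masks - 1 ∧ pvSigAt sig r c ≠ pvSigAt sig (r + 1) c)
          then (1 : Int) else 0))
    else
      (PySem.List.pyRange 0 (pvH band_masks) 1).map (fun r =>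
        (PySem.List.pyRange 0 (pvW band_masks) 1).map (fun c =>
          if (0 < c ∧ pvSigAt sig r c ≠ pvSigAt sig r (c - 1)) ∨
             (c < pvW band_masks - 1 ∧ pvSigAt sig r c ≠ pvSigAt sig r (c + 1))
          then (1 : Int) else 0))

-- ===== PRECONDITION & SPEC =====
-- Pre_ excludes ragged band lists (when h,w > 0, a band with fewer than h rows, or one of its
-- first h rows with fewer than w entries): there A may raise IndexError or return while an early
-- break skips the malformed band, and B's full signature table raises IndexError.
def Pre_nps_boundary_masks (band_masks : List (List (List Int))) (axis : String) : Prop :=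
  band_masks = [] ∨ (band_masks.headD []).length = 0 ∨ ((band_masks.headD []).headD []).length = 0 ∨
    ∀ b ∈ band_masks, (band_masks.headD []).length ≤ b.length ∧
      ∀ row ∈ b.take (band_masks.headD []).length, ((band_masks.headD []).headD []).length ≤ row.length
instance (band_masks : List (List (List Int))) (axis : String) : Decidable (Pre_nps_boundary_masks band_masks axis) := by unfold Pre_nps_boundary_masks; infer_instance

def pvWitness_nps_boundary_masks : List (List (List Int)) × String := ([[[1, 0], [0, 1]]], "row")

def Spec_nps_boundary_masks (band_masks : List (List (List Int))) (axis : String) (out : List (List Int)) : Prop := out = nps_boundary_masks_alt band_masks axis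
instance (band_masks : List (List (List Int))) (axis : String) (out : List (List Int)) : Decidable (Spec_nps_boundary_masks band_masks axis out) := by unfold Spec_nps_boundary_masks; infer_instance

-- ===== CLAIM (what is proved, stated in full; the proofs are below) =====
def Claim_equal_nps_boundary_masks : Prop := ∀ (band_masks : List (List (List Int))) (axis : String), Dom_nps_boundary_masks band_masks axis → Pre_nps_boundary_masks band_masks axis → Spec_nps_boundary_masks band_masks axis (nps_boundary_masks band_masks axis)

-- ===== LEMMAS AND PROOFS =====

lemma pv_fill_row {α : Type} (g : Nat → α) :
    ∀ (n : Nat) (row : List α), n ≤ row.length →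
      (List.range n).foldl (fun ro k => ro.set k (g k)) row = (List.range n).map g ++ row.drop n := by
  intro n
  induction n with
  | zero => simp
  | succ n ih =>
    intro row hle
    have hn : n < row.length := by omega
    rw [List.range_succ, List.foldl_append, List.foldl_cons, List.foldl_nil,
        ih row (by omega), List.set_append, if_neg (by simp)]
    simp only [List.length_map, List.length_range, Nat.sub_self]
    rw [List.drop_eq_getElem_cons hn, List.set_cons_zero]
    simp

lemma pv_row_pull {α : Type} (r : Nat) (v : Nat → α) :
    ∀ (l : List Nat) (bd : List (List α)), r < bd.length →
      l.foldl (fun bd c => bd.set r ((bd.getD r []).set c (v c))) bd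
        = bd.set r (l.foldl (fun ro c => ro.set c (v c)) (bd.getD r [])) := by
  intro l
  induction l with
  | nil =>
    intro bd h
    simp only [List.foldl_nil]
    rw [List.getD_eq_getElem _ _ h, List.set_getElem_self]
  | cons c cs ih =>
    intro bd h
    simp only [List.foldl_cons]
    rw [ih _ (by simpa using h)]
    have hset : ((bd.set r ((bd.getD r []).set c (v c))).getD r [])
        = (bd.getD r []).set c (v c) := by
      rw [List.getD_eq_getElem _ _ (by simpa using h), List.getElem_set_self,
          List.getD_eq_getElem _ _ h]
    rw [hset, List.set_set]

lemma pv_matrix_fill {α : Type} (val : Nat → Nat → α) (z : α) (H W : Nat) :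
    (List.range H).foldl (fun bd r =>
        (List.range W).foldl (fun bd c => bd.set r ((bd.getD r []).set c (val r c))) bd)
      (List.replicate H (List.replicate W z))
    = (List.range H).map (fun r => (List.range W).map (val r)) := by
  have aux : ∀ n, n ≤ H →
      (List.range n).foldl (fun bd r =>
          (List.range W).foldl (fun bd c => bd.set r ((bd.getD r []).set c (val r c))) bd)
        (List.replicate H (List.replicate W z))
      = (List.range n).map (fun r => (List.range W).map (val r)) ++
          List.replicate (H - n) (List.replicate W z) := by
    intro n
    induction n with
    | zero => simp
    | succ n ih =>
      intro hle
      rw [List.range_succ, List.foldl_append, List.foldl_cons, List.foldl_nil, ih (by omega)]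
      have hlen : n < ((List.range n).map (fun r => (List.range W).map (val r)) ++
          List.replicate (H - n) (List.replicate W z)).length := by
        simp; omega
      rw [pv_row_pull n (val n) _ _ hlen]
      have hrep : H - n = (H - (n + 1)) + 1 := by omega
      have hget : ((List.range n).map (fun r => (List.range W).map (val r)) ++
          List.replicate (H - n) (List.replicate W z)).getD n [] = List.replicate W z := by
        rw [List.getD_append_right _ _ _ _ (by simp)]
        simp only [List.length_map, List.length_range, Nat.sub_self, hrep, List.replicate_succ]
        rfl
      rw [hget, pv_fill_row (val n) W _ (by simp), List.set_append, if_neg (by simp)]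
      simp only [List.length_map, List.length_range, Nat.sub_self, hrep, List.replicate_succ,
                 List.set_cons_zero, List.drop_replicate]
      simp
  rw [aux H le_rfl]
  simp

lemma pv_build_eq (h w : Int) (HN WN : Nat) (hh : h = (HN : Int)) (hw : w = (WN : Int))
    (val valB : Int → Int → Int)
    (hpix : ∀ r c : Int, 0 ≤ r → r < h → 0 ≤ c → c < w → val r c = valB r c) :
    (PySem.List.pyRange 0 h 1).foldl (fun bd r =>
        (PySem.List.pyRange 0 w 1).foldl (fun bd c =>
          bd.set r.toNat ((PySem.List.pyGetD bd r []).set c.toNat (val r c))) bd)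
      (List.replicate h.toNat (List.replicate w.toNat 0))
    = (PySem.List.pyRange 0 h 1).map (fun r => (PySem.List.pyRange 0 w 1).map (fun c => valB r c)) := by
  subst hh hw
  rw [PySem.List.pyRange_zero_nat, PySem.List.pyRange_zero_nat]
  rw [List.foldl_map]
  simp only [List.foldl_map, Int.toNat_natCast, PySem.List.pyGetD_natCast]
  rw [pv_matrix_fill (fun k j => val (k : Int) (j : Int)) 0 HN WN]
  simp only [List.map_map, Function.comp_def]
  refine List.map_congr_left ?_
  intro k hk
  refine List.map_congr_left ?_
  intro j hj
  exact hpix _ _ (by positivity) (by exact_mod_cast List.mem_range.mp hk)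
    (by positivity) (by exact_mod_cast List.mem_range.mp hj)

lemma pv_any_ne {α β : Type} [DecidableEq β] (l : List α) (f g : α → β) :
    (l.any fun x => f x != g x) = decide (l.map f ≠ l.map g) := by
  induction l with
  | nil => simp
  | cons a l ih =>
    simp only [List.any_cons, List.map_cons, ih]
    by_cases h : f a = g a <;> simp [h]

lemma pv_sigAt (band_masks : List (List (List Int))) (h w r c : Int)
    (h0 : 0 ≤ r) (h1 : r < h) (h2 : 0 ≤ c) (h3 : c < w) :
    pvSigAt (pvSig band_masks h w) r c = band_masks.map (fun bm => pvCell bm r c) := by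
  unfold pvSigAt pvSig
  rw [PySem.List.pyGetD_map_pyRange_of_nonneg _ _ _ _ h0 h1,
      PySem.List.pyGetD_map_pyRange_of_nonneg _ _ _ _ h2 h3]

lemma pv_pixel_row (band_masks : List (List (List Int))) (h r c : Int) :
    pvRowVal band_masks h r c =
      if (0 < r ∧ band_masks.map (fun bm => pvCell bm r c) ≠ band_masks.map (fun bm => pvCell bm (r - 1) c)) ∨
         (r < h - 1 ∧ band_masks.map (fun bm => pvCell bm r c) ≠ band_masks.map (fun bm => pvCell bm (r + 1) c))
      then 1 else 0 := by
  unfold pvRowVal pvAnyDiff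
  rw [pv_any_ne, pv_any_ne]
  by_cases hp : 0 < r <;> by_cases hq : r < h - 1 <;>
    by_cases hd1 : band_masks.map (fun bm => pvCell bm r c) ≠ band_masks.map (fun bm => pvCell bm (r - 1) c) <;>
      by_cases hd2 : band_masks.map (fun bm => pvCell bm r c) ≠ band_masks.map (fun bm => pvCell bm (r + 1) c) <;>
        simp [hp, hq, hd1, hd2]

lemma pv_pixel_col (band_masks : List (List (List Int))) (w r c : Int) :
    pvColVal band_masks w r c =
      if (0 < c ∧ band_masks.map (fun bm => pvCell bm r c) ≠ band_masks.map (fun bm => pvCell bm r (c - 1))) ∨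
         (c < w - 1 ∧ band_masks.map (fun bm => pvCell bm r c) ≠ band_masks.map (fun bm => pvCell bm r (c + 1)))
      then 1 else 0 := by
  unfold pvColVal pvAnyDiff
  rw [pv_any_ne, pv_any_ne]
  by_cases hp : 0 < c <;> by_cases hq : c < w - 1 <;>
    by_cases hd1 : band_masks.map (fun bm => pvCell bm r c) ≠ band_masks.map (fun bm => pvCell bm r (c - 1)) <;>
      by_cases hd2 : band_masks.map (fun bm => pvCell bm r c) ≠ band_masks.map (fun bm => pvCell bm r (c + 1)) <;>
        simp [hp, hq, hd1, hd2]

-- ===== VERDICT (by name: the statement is the Claim_ definition above) =====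
theorem nps_boundary_masks_spec : Claim_equal_nps_boundary_masks := by
  intro band_masks axis _ _
  unfold Spec_nps_boundary_masks nps_boundary_masks nps_boundary_masks_alt
  by_cases hnil : band_masks = []
  · simp [hnil]
  by_cases hz : pvH band_masks = 0 ∨ pvW band_masks = 0
  · simp [hnil, hz]
  simp only [if_neg hnil, if_neg hz]
  have hh : pvH band_masks = (((band_masks.headD []).length : Nat) : Int) := rfl
  have hw : pvW band_masks = ((pvW band_masks).toNat : Int) := by
    unfold pvW
    split <;> simp
  by_cases hax : axis = "row"
  · simp only [if_pos hax]
    refine pv_build_eq _ _ _ _ hh hw _ _ ?_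
    intro r c hr0 hr1 hc0 hc1
    rw [pv_pixel_row]
    refine if_congr (or_congr (and_congr_right fun hp => ?_) (and_congr_right fun hq => ?_)) rfl rfl
    · rw [pv_sigAt _ _ _ _ _ hr0 hr1 hc0 hc1, pv_sigAt _ _ _ _ _ (by omega) (by omega) hc0 hc1]
    · rw [pv_sigAt _ _ _ _ _ hr0 hr1 hc0 hc1, pv_sigAt _ _ _ _ _ (by omega) (by omega) hc0 hc1]
  · simp only [if_neg hax]
    refine pv_build_eq _ _ _ _ hh hw _ _ ?_
    intro r c hr0 hr1 hc0 hc1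
    rw [pv_pixel_col]
    refine if_congr (or_congr (and_congr_right fun hp => ?_) (and_congr_right fun hq => ?_)) rfl rfl
    · rw [pv_sigAt _ _ _ _ _ hr0 hr1 hc0 hc1, pv_sigAt _ _ _ _ _ hr0 hr1 (by omega) (by omega)]
    · rw [pv_sigAt _ _ _ _ _ hr0 hr1 hc0 hc1, pv_sigAt _ _ _ _ _ hr0 hr1 (by omega) (by omega)]
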